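-- pv_equiv track=rewrite | github.com/Rducker0208/adventofcode | 2022/day9/day9.2.py | get_neighbouring_locations
-- ===== SOURCE A (Python) =====
-- def check_distance(head_loc, tail_loc):
--     manhattan_distance = abs((head_loc[0] - tail_loc[0])) + abs((head_loc[1] - tail_loc[1]))
--     return manhattan_distance
--
-- def get_neighbouring_locations(head_loc, tail_loc):
--     head_locations = [(head_loc[0] - 1, y) for y in [head_loc[1] - 1, head_loc[1], head_loc[1] + 1]]  # // links
--     head_locations.extend([(head_loc[0] + 1, y) for y in [head_loc[1] - 1, head_loc[1], head_loc[1] + 1]])  # // rechts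
--     head_locations.append((head_loc[0], head_loc[1] + 1))  # // boven
--     head_locations.append((head_loc[0], head_loc[1] - 1))  # // beneden
--
--     tailing_locations = [(tail_loc[0] - 1, y) for y in [tail_loc[1] - 1, tail_loc[1], tail_loc[1] + 1]]  # // links
--     tailing_locations.extend([(tail_loc[0] + 1, y) for y in [tail_loc[1] - 1, tail_loc[1], tail_loc[1] + 1]])  # // rechts
--     tailing_locations.append((tail_loc[0], tail_loc[1] + 1))  # // boven
--     tailing_locations.append((tail_loc[0], tail_loc[1] - 1))  # // beneden
--
--     optimal_distance = 10 ** 100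
--     optimal_loc = None
--     for location in head_locations:
--         if location in tailing_locations:
--             distance_to_head = check_distance(head_loc, location)
--             if distance_to_head < optimal_distance:
--                 optimal_distance = distance_to_head
--                 optimal_loc = location
--
--     return optimal_loc
-- ===== SOURCE B (Python) =====
-- # A cell neighbours the tail iff its Chebyshev distance to the tail is exactly 1.
-- # Scan head's neighbours nearest-first (the four adjacent cells, then the four
-- # diagonals) and return the first one that also neighbours the tail.
-- _STEPS = [(-1, 0), (1, 0), (0, 1), (0, -1),
--           (-1, -1), (-1, 1), (1, -1), (1, 1)]
--
-- def get_neighbouring_locations(head_loc, tail_loc):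
--     for dx, dy in _STEPS:
--         cand = (head_loc[0] + dx, head_loc[1] + dy)
--         if max(abs(cand[0] - tail_loc[0]), abs(cand[1] - tail_loc[1])) == 1:
--             return cand
--     return None
-- ===== Notes on version B (the rewrite author's own statement) =====
-- stated objective: simpler
-- what changed: B drops the tail neighbour list, the membership scan and the running minimum: it walks head's neighbours nearest-first (adjacent cells, then diagonals) and returns the first whose Chebyshev distance to the tail is 1.
import Mathlib
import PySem

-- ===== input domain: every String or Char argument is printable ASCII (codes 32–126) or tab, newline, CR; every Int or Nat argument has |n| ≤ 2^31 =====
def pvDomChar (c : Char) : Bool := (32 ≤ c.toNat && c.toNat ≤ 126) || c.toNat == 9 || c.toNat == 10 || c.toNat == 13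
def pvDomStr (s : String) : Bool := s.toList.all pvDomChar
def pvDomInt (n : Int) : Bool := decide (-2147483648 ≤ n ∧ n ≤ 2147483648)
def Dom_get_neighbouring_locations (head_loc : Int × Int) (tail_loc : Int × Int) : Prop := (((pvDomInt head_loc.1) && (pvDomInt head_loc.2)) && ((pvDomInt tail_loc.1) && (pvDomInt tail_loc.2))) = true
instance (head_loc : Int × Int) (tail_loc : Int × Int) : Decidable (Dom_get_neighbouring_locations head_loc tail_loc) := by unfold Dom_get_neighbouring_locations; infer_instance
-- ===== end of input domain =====

-- One honest line: B replaces A's two neighbour lists, membership scan and running minimum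
-- by a nearest-first walk of head's neighbours with a Chebyshev-distance-1 test (simpler).

-- ===== PORT A =====
def check_distance (head_loc : Int × Int) (tail_loc : Int × Int) : Int :=
  |head_loc.1 - tail_loc.1| + |head_loc.2 - tail_loc.2|

def get_neighbouring_locations (head_loc : Int × Int) (tail_loc : Int × Int) : Option (Int × Int) :=
  let head_locations : List (Int × Int) :=
    (([(head_loc.1 - 1, head_loc.2 - 1), (head_loc.1 - 1, head_loc.2), (head_loc.1 - 1, head_loc.2 + 1)] ++
      [(head_loc.1 + 1, head_loc.2 - 1), (head_loc.1 + 1, head_loc.2), (head_loc.1 + 1, head_loc.2 + 1)]) ++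
     [(head_loc.1, head_loc.2 + 1)]) ++ [(head_loc.1, head_loc.2 - 1)]
  let tailing_locations : List (Int × Int) :=
    (([(tail_loc.1 - 1, tail_loc.2 - 1), (tail_loc.1 - 1, tail_loc.2), (tail_loc.1 - 1, tail_loc.2 + 1)] ++
      [(tail_loc.1 + 1, tail_loc.2 - 1), (tail_loc.1 + 1, tail_loc.2), (tail_loc.1 + 1, tail_loc.2 + 1)]) ++
     [(tail_loc.1, tail_loc.2 + 1)]) ++ [(tail_loc.1, tail_loc.2 - 1)]
  let st := head_locations.foldl
    (fun (st : Int × Option (Int × Int)) location =>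
      if location ∈ tailing_locations then
        let distance_to_head := check_distance head_loc location
        if distance_to_head < st.1 then (distance_to_head, some location) else st
      else st)
    ((10 : Int) ^ 100, none)
  st.2

-- ===== PORT B =====
-- the step list _STEPS from Source B: adjacent cells first, then diagonals
def pvSteps : List (Int × Int) :=
  [(-1, 0), (1, 0), (0, 1), (0, -1), (-1, -1), (-1, 1), (1, -1), (1, 1)]

-- the for-loop of Source B with its early return: first candidate at Chebyshev distance 1 from tail
def pvFirstNbr (hx hy tx ty : Int) : List (Int × Int) → Option (Int × Int)
  | [] => none
  | d :: rest =>
      if max |hx + d.1 - tx| |hy + d.2 - ty| = 1 then some (hx + d.1, hy + d.2)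
      else pvFirstNbr hx hy tx ty rest

def get_neighbouring_locations_alt (head_loc : Int × Int) (tail_loc : Int × Int) : Option (Int × Int) :=
  pvFirstNbr head_loc.1 head_loc.2 tail_loc.1 tail_loc.2 pvSteps

-- ===== PRECONDITION & SPEC =====
def Spec_get_neighbouring_locations (head_loc : Int × Int) (tail_loc : Int × Int) (out : Option (Int × Int)) : Prop := out = get_neighbouring_locations_alt head_loc tail_loc
instance (head_loc : Int × Int) (tail_loc : Int × Int) (out : Option (Int × Int)) : Decidable (Spec_get_neighbouring_locations head_loc tail_loc out) := by unfold Spec_get_neighbouring_locations; infer_instance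

-- ===== CLAIM =====
def Claim_equal_get_neighbouring_locations : Prop := ∀ (head_loc : Int × Int) (tail_loc : Int × Int), Dom_get_neighbouring_locations head_loc tail_loc → Spec_get_neighbouring_locations head_loc tail_loc (get_neighbouring_locations head_loc tail_loc)

-- ===== LEMMAS AND PROOFS =====

-- clean views of port A (definitional), used by the proofs
def pvNbrs (p : Int × Int) : List (Int × Int) :=
  [(p.1 - 1, p.2 - 1), (p.1 - 1, p.2), (p.1 - 1, p.2 + 1),
   (p.1 + 1, p.2 - 1), (p.1 + 1, p.2), (p.1 + 1, p.2 + 1),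
   (p.1, p.2 + 1), (p.1, p.2 - 1)]

def pvStep (hd : Int × Int) (tl : List (Int × Int)) (st : Int × Option (Int × Int))
    (loc : Int × Int) : Int × Option (Int × Int) :=
  if loc ∈ tl then
    (if check_distance hd loc < st.1 then (check_distance hd loc, some loc) else st)
  else st

theorem pvA_view (h t : Int × Int) :
    get_neighbouring_locations h t =
      (List.foldl (pvStep h (pvNbrs t)) ((10 : Int) ^ 100, none) (pvNbrs h)).2 := rfl

theorem pvT_inj (hx hy : Int) :
    Function.Injective (fun p : Int × Int => (hx + p.1, hy + p.2)) := by
  intro p q hpq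
  simp only [Prod.mk.injEq] at hpq
  exact Prod.ext (by omega) (by omega)

theorem pvCheck_shift (hx hy : Int) (loc : Int × Int) :
    check_distance (hx, hy) (hx + loc.1, hy + loc.2) = check_distance (0, 0) loc := by
  unfold check_distance
  congr 1 <;> congr 1 <;> ring

theorem pvNbrs_shift (hx hy a b : Int) :
    pvNbrs (hx + a, hy + b) =
      (pvNbrs (a, b)).map (fun p : Int × Int => (hx + p.1, hy + p.2)) := by
  (simp [pvNbrs, Prod.ext_iff]; omega)

theorem pvFold_shift (hx hy : Int) (l tl : List (Int × Int)) (s1 : Int)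
    (s2 : Option (Int × Int)) :
    List.foldl (pvStep (hx, hy) (tl.map (fun p : Int × Int => (hx + p.1, hy + p.2))))
        (s1, s2.map (fun p : Int × Int => (hx + p.1, hy + p.2)))
        (l.map (fun p : Int × Int => (hx + p.1, hy + p.2))) =
      ((List.foldl (pvStep (0, 0) tl) (s1, s2) l).1,
       (List.foldl (pvStep (0, 0) tl) (s1, s2) l).2.map
         (fun p : Int × Int => (hx + p.1, hy + p.2))) := by
  induction l generalizing s1 s2 with
  | nil => rfl
  | cons x xs ih =>
      simp only [List.map_cons, List.foldl_cons]
      have hmem : ((hx + x.1, hy + x.2) ∈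
          tl.map (fun p : Int × Int => (hx + p.1, hy + p.2))) ↔ x ∈ tl := by
        constructor
        · intro hm
          rcases List.mem_map.mp hm with ⟨q, hq, hqe⟩
          have : q = x := pvT_inj hx hy hqe
          exact this ▸ hq
        · intro hm
          exact List.mem_map_of_mem hm
      show List.foldl _ (pvStep (hx, hy) _ (s1, Option.map _ s2) (hx + x.1, hy + x.2)) _ = _
      unfold pvStep
      rw [pvCheck_shift hx hy x]
      by_cases hm : x ∈ tl
      · rw [if_pos (hmem.mpr hm), if_pos hm]
        by_cases hd : check_distance (0, 0) x < s1
        · simp only [if_pos hd]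
          have := ih (check_distance (0, 0) x) (some x)
          simpa using this
        · simp only [if_neg hd]
          exact ih s1 s2
      · rw [if_neg (fun hc => hm (hmem.mp hc)), if_neg hm]
        exact ih s1 s2

theorem pvA_shift (hx hy a b : Int) :
    get_neighbouring_locations (hx, hy) (hx + a, hy + b) =
      Option.map (fun p : Int × Int => (hx + p.1, hy + p.2))
        (get_neighbouring_locations (0, 0) (a, b)) := by
  rw [pvA_view, pvA_view]
  have h2 : pvNbrs (hx, hy) =
      (pvNbrs ((0 : Int), (0 : Int))).map (fun p : Int × Int => (hx + p.1, hy + p.2)) := by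
    have := pvNbrs_shift hx hy 0 0
    simpa using this
  rw [pvNbrs_shift hx hy a b, h2]
  have h3 := pvFold_shift hx hy (pvNbrs ((0 : Int), (0 : Int))) (pvNbrs (a, b))
    ((10 : Int) ^ 100) none
  simp only [Option.map_none] at h3
  rw [h3]

theorem pvFirstNbr_shift (hx hy a b : Int) (l : List (Int × Int)) :
    pvFirstNbr hx hy (hx + a) (hy + b) l =
      Option.map (fun p : Int × Int => (hx + p.1, hy + p.2)) (pvFirstNbr 0 0 a b l) := by
  induction l with
  | nil => rfl
  | cons d rest ih =>
      unfold pvFirstNbr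
      have e1 : (hx + d.1 - (hx + a) : Int) = d.1 - a := by ring
      have e2 : (hy + d.2 - (hy + b) : Int) = d.2 - b := by ring
      rw [e1, e2]
      by_cases h : max |d.1 - a| |d.2 - b| = (1 : Int)
      · simp [h]
      · simp only [zero_add] at *
        rw [if_neg h, if_neg h, ih]

theorem pvB_shift (hx hy a b : Int) :
    get_neighbouring_locations_alt (hx, hy) (hx + a, hy + b) =
      Option.map (fun p : Int × Int => (hx + p.1, hy + p.2))
        (get_neighbouring_locations_alt (0, 0) (a, b)) := by
  unfold get_neighbouring_locations_alt
  exact pvFirstNbr_shift hx hy a b pvSteps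

theorem pvFoldl_id {α β : Type} (f : β → α → β) (l : List α) (s : β)
    (h : ∀ st x, x ∈ l → f st x = st) : List.foldl f s l = s := by
  induction l generalizing s with
  | nil => rfl
  | cons a t ih => simp only [List.foldl_cons, h s a (List.mem_cons_self)]
                   exact ih s (fun st x hx => h st x (List.mem_cons_of_mem _ hx))

theorem pvA_far0 (dx dy : Int)
    (h : ¬((-2 ≤ dx ∧ dx ≤ 2) ∧ (-2 ≤ dy ∧ dy ≤ 2))) :
    get_neighbouring_locations (0, 0) (dx, dy) = none := by
  rw [pvA_view]
  rw [pvFoldl_id]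
  intro st x hmem
  simp only [pvNbrs, List.mem_cons, List.not_mem_nil, or_false] at hmem
  unfold pvStep
  rcases hmem with h1 | h1 | h1 | h1 | h1 | h1 | h1 | h1 <;> subst h1 <;>
    (rw [if_neg]; simp only [pvNbrs, List.mem_cons, List.not_mem_nil, or_false,
       Prod.mk.injEq]; omega)

theorem pvB_far0 (dx dy : Int)
    (h : ¬((-2 ≤ dx ∧ dx ≤ 2) ∧ (-2 ≤ dy ∧ dy ≤ 2))) :
    get_neighbouring_locations_alt (0, 0) (dx, dy) = none := by
  have key : ∀ a b : Int, (-1 ≤ a ∧ a ≤ 1 ∧ -1 ≤ b ∧ b ≤ 1) →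
      ¬(max |(0 : Int) + a - dx| |(0 : Int) + b - dy| = 1) := by
    intro a b hab he
    have hu : |(0 : Int) + a - dx| ≤ 1 := he ▸ le_max_left _ _
    have hv : |(0 : Int) + b - dy| ≤ 1 := he ▸ le_max_right _ _
    have h1 := abs_le.mp hu
    have h2 := abs_le.mp hv
    omega
  unfold get_neighbouring_locations_alt pvSteps
  simp only [pvFirstNbr]
  rw [if_neg (key (-1) 0 (by norm_num)), if_neg (key 1 0 (by norm_num)),
      if_neg (key 0 1 (by norm_num)), if_neg (key 0 (-1) (by norm_num)),
      if_neg (key (-1) (-1) (by norm_num)), if_neg (key (-1) 1 (by norm_num)),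
      if_neg (key 1 (-1) (by norm_num)), if_neg (key 1 1 (by norm_num))]

-- ===== VERDICT =====
set_option maxHeartbeats 2000000 in
theorem get_neighbouring_locations_spec : Claim_equal_get_neighbouring_locations := by
  intro hl tl _
  obtain ⟨hx, hy⟩ := hl
  obtain ⟨tx, ty⟩ := tl
  unfold Spec_get_neighbouring_locations
  obtain ⟨dx, rfl⟩ : ∃ d, tx = hx + d := ⟨tx - hx, by ring⟩
  obtain ⟨dy, rfl⟩ : ∃ d, ty = hy + d := ⟨ty - hy, by ring⟩
  by_cases hin : (-2 ≤ dx ∧ dx ≤ 2) ∧ (-2 ≤ dy ∧ dy ≤ 2)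
  · obtain ⟨⟨a1, a2⟩, ⟨b1, b2⟩⟩ := hin
    rw [pvA_shift, pvB_shift]
    interval_cases dx <;> interval_cases dy <;>
      exact congrArg (Option.map _) (by decide)
  · rw [pvA_shift, pvB_shift, pvA_far0 dx dy hin, pvB_far0 dx dy hin]
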